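-- pv_equiv track=rewrite | github.com/NicoJorgensen1/MaskFormer | Custom_functions/show_learning_curves.py | extractRelevantHistoryKeys
-- ===== SOURCE A (Python) =====
-- def extractRelevantHistoryKeys(history):
--     loss_total = [key for key in history.keys() if "total_loss" in key.lower()]                         # Find all keys with loss_ce
--     m_fw_IoU = [key for key in history.keys() if key.endswith("IoU")]                                   # Find the mIoU and fIoU keys
--     pq_rq_sq = [key for key in history.keys() if any([x in key for x in ["_RQ", "_SQ", "_PQ"]]) and not any([x in key for x in ["_RQ_C", "_SQ_C", "_PQ_C"]])]   # Find all the [rq, sq, pq] keys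
--     mACC_pACC = [key for key in history.keys() if key.endswith("ACC")]                                  # Find the keys with the pixel accuracy
--     loss_ce = [key for key in history.keys() if "loss_ce" in key.lower() and key.endswith("ce")]        # Find all keys with loss_ce
--     loss_dice = [key for key in history.keys() if "loss_dice" in key.lower() and key.endswith("dice")]  # Find all keys with loss_dice
--     loss_mask = [key for key in history.keys() if "loss_mask" in key.lower() and key.endswith("mask")]  # Find all keys with loss_mask
--     IoU_per_class = [key for key in history.keys() if "_IoU_" in key and not key.endswith("IoU")]       # Find the class specific IoU keys
--     pACC_per_class = [key for key in history.keys() if "_ACC_" in key and not key.endswith("ACC")]      # Find the class specific pixel accuracies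
--     PQ_per_class = [key for key in history.keys() if "_PQ_" in key and not key.endswith("PQ")]          # Extract all keys with the per_class PQ
--     RQ_per_class = [key for key in history.keys() if "_RQ_" in key and not key.endswith("RQ")]          # Extract all keys with the per_class RQ
--     SQ_per_class = [key for key in history.keys() if "_SQ_" in key and not key.endswith("SQ")]          # Extract all keys with the per_class SQ
--     learn_rate = [key for key in history.keys() if "lr" in key.lower() and "val" not in key.lower()]    # Find the training learning rate
--     hist_keys = [loss_total, m_fw_IoU, pq_rq_sq, mACC_pACC, loss_ce, loss_dice, loss_mask,              # Combine the key-lists into a list of ...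
--                 learn_rate, pACC_per_class, PQ_per_class, RQ_per_class, SQ_per_class, IoU_per_class]    # lists containing all relevant keys
--     return hist_keys
-- ===== SOURCE B (Python) =====
-- # Table-driven rewrite: categories are data (a rule table in output order),
-- # one generic rule interpreter classifies each key in a single pass.
-- _RULES = [
--     [("inlow", "total_loss")],
--     [("end", "IoU")],
--     [("anyin", ["_RQ", "_SQ", "_PQ"]), ("nonein", ["_RQ_C", "_SQ_C", "_PQ_C"])],
--     [("end", "ACC")],
--     [("inlow", "loss_ce"), ("end", "ce")],
--     [("inlow", "loss_dice"), ("end", "dice")],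
--     [("inlow", "loss_mask"), ("end", "mask")],
--     [("inlow", "lr"), ("notinlow", "val")],
--     [("in", "_ACC_"), ("notend", "ACC")],
--     [("in", "_PQ_"), ("notend", "PQ")],
--     [("in", "_RQ_"), ("notend", "RQ")],
--     [("in", "_SQ_"), ("notend", "SQ")],
--     [("in", "_IoU_"), ("notend", "IoU")],
-- ]
--
-- def _holds(req, key, kl):
--     kind, arg = req
--     if kind == "inlow":
--         return arg in kl
--     if kind == "in":
--         return arg in key
--     if kind == "end":
--         return key.endswith(arg)
--     if kind == "notend":
--         return not key.endswith(arg)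
--     if kind == "notinlow":
--         return arg not in kl
--     if kind == "anyin":
--         return any(s in key for s in arg)
--     return not any(s in key for s in arg)  # "nonein"
--
-- def extractRelevantHistoryKeys(history):
--     groups = [[] for _ in _RULES]
--     for key in history.keys():
--         kl = key.lower()
--         for group, spec in zip(groups, _RULES):
--             if all(_holds(req, key, kl) for req in spec):
--                 group.append(key)
--     return groups
-- ===== Notes on version B (the rewrite author's own statement) =====
-- stated objective: alternative
-- what changed: Replaces thirteen hardcoded comprehension passes with a table-driven design: the categories are a declarative rule table (in output order) interpreted by one generic requirement evaluator, and a single pass over the keys classifies each key against the table into the group accumulators.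
import Mathlib
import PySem

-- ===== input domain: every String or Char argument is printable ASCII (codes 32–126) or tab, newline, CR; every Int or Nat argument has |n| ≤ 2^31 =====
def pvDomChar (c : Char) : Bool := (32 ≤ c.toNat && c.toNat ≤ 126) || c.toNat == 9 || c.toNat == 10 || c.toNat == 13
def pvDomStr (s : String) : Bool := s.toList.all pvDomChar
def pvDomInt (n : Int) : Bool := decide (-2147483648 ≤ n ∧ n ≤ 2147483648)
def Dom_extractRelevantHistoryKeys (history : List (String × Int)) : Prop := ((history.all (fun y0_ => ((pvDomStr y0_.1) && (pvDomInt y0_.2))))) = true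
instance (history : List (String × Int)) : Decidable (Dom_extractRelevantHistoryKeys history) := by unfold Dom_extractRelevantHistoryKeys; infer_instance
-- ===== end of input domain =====

-- B is an alternative decomposition: a declarative rule table interpreted by a generic
-- requirement evaluator, classifying each key in one pass, instead of thirteen hardcoded passes.

-- ===== PORT A =====
def pvLossTotal (key : String) : Bool := PySem.Str.isIn "total_loss" (PySem.Str.lower key)
def pvMfwIoU (key : String) : Bool := PySem.Str.endswith key "IoU"
def pvPqRqSq (key : String) : Bool :=
  (PySem.Str.isIn "_RQ" key || PySem.Str.isIn "_SQ" key || PySem.Str.isIn "_PQ" key) &&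
  !(PySem.Str.isIn "_RQ_C" key || PySem.Str.isIn "_SQ_C" key || PySem.Str.isIn "_PQ_C" key)
def pvMacc (key : String) : Bool := PySem.Str.endswith key "ACC"
def pvLossCe (key : String) : Bool := PySem.Str.isIn "loss_ce" (PySem.Str.lower key) && PySem.Str.endswith key "ce"
def pvLossDice (key : String) : Bool := PySem.Str.isIn "loss_dice" (PySem.Str.lower key) && PySem.Str.endswith key "dice"
def pvLossMask (key : String) : Bool := PySem.Str.isIn "loss_mask" (PySem.Str.lower key) && PySem.Str.endswith key "mask"
def pvIoUPerClass (key : String) : Bool := PySem.Str.isIn "_IoU_" key && !PySem.Str.endswith key "IoU"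
def pvAccPerClass (key : String) : Bool := PySem.Str.isIn "_ACC_" key && !PySem.Str.endswith key "ACC"
def pvPqPerClass (key : String) : Bool := PySem.Str.isIn "_PQ_" key && !PySem.Str.endswith key "PQ"
def pvRqPerClass (key : String) : Bool := PySem.Str.isIn "_RQ_" key && !PySem.Str.endswith key "RQ"
def pvSqPerClass (key : String) : Bool := PySem.Str.isIn "_SQ_" key && !PySem.Str.endswith key "SQ"
def pvLearnRate (key : String) : Bool := PySem.Str.isIn "lr" (PySem.Str.lower key) && !PySem.Str.isIn "val" (PySem.Str.lower key)

def extractRelevantHistoryKeys (history : List (String × Int)) : List (List String) :=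
  let ks := (PySem.Dict.ofList history).keys
  let loss_total := ks.filter pvLossTotal
  let m_fw_IoU := ks.filter pvMfwIoU
  let pq_rq_sq := ks.filter pvPqRqSq
  let mACC_pACC := ks.filter pvMacc
  let loss_ce := ks.filter pvLossCe
  let loss_dice := ks.filter pvLossDice
  let loss_mask := ks.filter pvLossMask
  let IoU_per_class := ks.filter pvIoUPerClass
  let pACC_per_class := ks.filter pvAccPerClass
  let PQ_per_class := ks.filter pvPqPerClass
  let RQ_per_class := ks.filter pvRqPerClass
  let SQ_per_class := ks.filter pvSqPerClass
  let learn_rate := ks.filter pvLearnRate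
  [loss_total, m_fw_IoU, pq_rq_sq, mACC_pACC, loss_ce, loss_dice, loss_mask,
   learn_rate, pACC_per_class, PQ_per_class, RQ_per_class, SQ_per_class, IoU_per_class]

-- ===== PORT B =====
-- a requirement of a rule: the atomic conditions _holds interprets
inductive PvReq where
  | inLow : String → PvReq      -- arg in key.lower()
  | inStr : String → PvReq      -- arg in key
  | ends : String → PvReq       -- key.endswith(arg)
  | notEnds : String → PvReq    -- not key.endswith(arg)
  | notInLow : String → PvReq   -- arg not in key.lower()
  | anyIn : List String → PvReq -- any(s in key for s in arg)
  | noneIn : List String → PvReq-- not any(s in key for s in arg)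
  deriving DecidableEq, Repr

-- the rule table, in output order (Source B's _RULES)
def pvRules : List (List PvReq) :=
  [[.inLow "total_loss"],
   [.ends "IoU"],
   [.anyIn ["_RQ", "_SQ", "_PQ"], .noneIn ["_RQ_C", "_SQ_C", "_PQ_C"]],
   [.ends "ACC"],
   [.inLow "loss_ce", .ends "ce"],
   [.inLow "loss_dice", .ends "dice"],
   [.inLow "loss_mask", .ends "mask"],
   [.inLow "lr", .notInLow "val"],
   [.inStr "_ACC_", .notEnds "ACC"],
   [.inStr "_PQ_", .notEnds "PQ"],
   [.inStr "_RQ_", .notEnds "RQ"],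
   [.inStr "_SQ_", .notEnds "SQ"],
   [.inStr "_IoU_", .notEnds "IoU"]]

-- Source B's _holds: the generic requirement evaluator
def pvHolds (key kl : String) : PvReq → Bool
  | .inLow s => PySem.Str.isIn s kl
  | .inStr s => PySem.Str.isIn s key
  | .ends s => PySem.Str.endswith key s
  | .notEnds s => !PySem.Str.endswith key s
  | .notInLow s => !PySem.Str.isIn s kl
  | .anyIn l => l.any (fun s => PySem.Str.isIn s key)
  | .noneIn l => !(l.any (fun s => PySem.Str.isIn s key))

-- one key's step: append the key to every group whose rule it satisfies
def pvStep (groups : List (List String)) (key : String) : List (List String) :=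
  let kl := PySem.Str.lower key
  List.zipWith (fun g spec => if spec.all (pvHolds key kl) then g ++ [key] else g) groups pvRules

def extractRelevantHistoryKeys_alt (history : List (String × Int)) : List (List String) :=
  ((PySem.Dict.ofList history).keys).foldl pvStep (List.replicate 13 [])

-- ===== PRECONDITION & SPEC =====
def Spec_extractRelevantHistoryKeys (history : List (String × Int)) (out : List (List String)) : Prop := out = extractRelevantHistoryKeys_alt history
instance (history : List (String × Int)) (out : List (List String)) : Decidable (Spec_extractRelevantHistoryKeys history out) := by unfold Spec_extractRelevantHistoryKeys; infer_instance

-- ===== CLAIM (what is proved, stated in full; the proofs are below) =====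
def Claim_equal_extractRelevantHistoryKeys : Prop := ∀ (history : List (String × Int)), Dom_extractRelevantHistoryKeys history → Spec_extractRelevantHistoryKeys history (extractRelevantHistoryKeys history)

-- ===== LEMMAS AND PROOFS =====
-- the rule i, interpreted, is A's i-th predicate
def pvPred (spec : List PvReq) (k : String) : Bool := spec.all (pvHolds k (PySem.Str.lower k))

-- appending-to-one-group step, as a rewrite rule
theorem pvAux (c : Bool) (g tl : List String) (k : String) :
    (if c = true then g ++ [k] else g) ++ tl = g ++ (if c = true then k :: tl else tl) := by
  cases c <;> simp

-- the fold, from any thirteen accumulators, appends exactly the thirteen interpreted filters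
theorem pvFold_eq (l : List String) (g0 g1 g2 g3 g4 g5 g6 g7 g8 g9 g10 g11 g12 : List String) :
    l.foldl pvStep [g0, g1, g2, g3, g4, g5, g6, g7, g8, g9, g10, g11, g12] =
      [g0 ++ l.filter (pvPred [.inLow "total_loss"]),
       g1 ++ l.filter (pvPred [.ends "IoU"]),
       g2 ++ l.filter (pvPred [.anyIn ["_RQ", "_SQ", "_PQ"], .noneIn ["_RQ_C", "_SQ_C", "_PQ_C"]]),
       g3 ++ l.filter (pvPred [.ends "ACC"]),
       g4 ++ l.filter (pvPred [.inLow "loss_ce", .ends "ce"]),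
       g5 ++ l.filter (pvPred [.inLow "loss_dice", .ends "dice"]),
       g6 ++ l.filter (pvPred [.inLow "loss_mask", .ends "mask"]),
       g7 ++ l.filter (pvPred [.inLow "lr", .notInLow "val"]),
       g8 ++ l.filter (pvPred [.inStr "_ACC_", .notEnds "ACC"]),
       g9 ++ l.filter (pvPred [.inStr "_PQ_", .notEnds "PQ"]),
       g10 ++ l.filter (pvPred [.inStr "_RQ_", .notEnds "RQ"]),
       g11 ++ l.filter (pvPred [.inStr "_SQ_", .notEnds "SQ"]),
       g12 ++ l.filter (pvPred [.inStr "_IoU_", .notEnds "IoU"])] := by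
  induction l generalizing g0 g1 g2 g3 g4 g5 g6 g7 g8 g9 g10 g11 g12 with
  | nil => simp
  | cons k l ih =>
    rw [List.foldl_cons]
    simp only [pvStep, pvRules, List.zipWith]
    rw [ih]
    simp only [pvPred, List.filter_cons, pvAux]
    rfl

theorem extractRelevantHistoryKeys_eq_alt (history : List (String × Int)) :
    extractRelevantHistoryKeys history = extractRelevantHistoryKeys_alt history := by
  unfold extractRelevantHistoryKeys extractRelevantHistoryKeys_alt
  show _ = _
  rw [show (List.replicate 13 ([] : List String)) = [[],[],[],[],[],[],[],[],[],[],[],[],[]] from rfl, pvFold_eq]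
  simp only [List.nil_append]
  refine List.ext_getElem (by simp) ?_
  intro i h1 h2
  simp only [List.length_cons, List.length_nil] at h2
  interval_cases i <;>
    · simp only [List.getElem_cons_zero, List.getElem_cons_succ]
      refine List.filter_congr ?_
      intro k _
      simp [pvPred, pvHolds, pvLossTotal, pvMfwIoU, pvPqRqSq, pvMacc, pvLossCe,
        pvLossDice, pvLossMask, pvIoUPerClass, pvAccPerClass, pvPqPerClass, pvRqPerClass,
        pvSqPerClass, pvLearnRate, List.any, Bool.or_assoc]

-- ===== VERDICT (by name: the statement is the Claim_ definition above) =====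
theorem extractRelevantHistoryKeys_spec : Claim_equal_extractRelevantHistoryKeys := by
  intro history _
  unfold Spec_extractRelevantHistoryKeys
  exact extractRelevantHistoryKeys_eq_alt history
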